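-- pv_equiv track=rewrite | github.com/Vladyslav92/Functionality | the_functions.py | sanitize_phone_number
-- ===== SOURCE A (Python) =====
-- def sanitize_phone_number(phone):
--     base = []
--     for i in phone:
--         if i in ' -()+':
--             continue
--         base.append(i)
--     real_string = ''.join(base)
--     return real_string
-- ===== SOURCE B (Python) =====
-- def sanitize_phone_number(phone):
--     return (phone.replace(' ', '')
--                  .replace('-', '')
--                  .replace('(', '')
--                  .replace(')', '')
--                  .replace('+', ''))
-- ===== Notes on version B (the rewrite author's own statement) =====
-- stated objective: faster
-- what changed: A's single Python-level pass that filters characters into an accumulator list and joins them is replaced by five sequential str.replace passes, one per forbidden character; equivalent because the five characters are disjoint and removing one never creates another.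
import Mathlib
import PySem

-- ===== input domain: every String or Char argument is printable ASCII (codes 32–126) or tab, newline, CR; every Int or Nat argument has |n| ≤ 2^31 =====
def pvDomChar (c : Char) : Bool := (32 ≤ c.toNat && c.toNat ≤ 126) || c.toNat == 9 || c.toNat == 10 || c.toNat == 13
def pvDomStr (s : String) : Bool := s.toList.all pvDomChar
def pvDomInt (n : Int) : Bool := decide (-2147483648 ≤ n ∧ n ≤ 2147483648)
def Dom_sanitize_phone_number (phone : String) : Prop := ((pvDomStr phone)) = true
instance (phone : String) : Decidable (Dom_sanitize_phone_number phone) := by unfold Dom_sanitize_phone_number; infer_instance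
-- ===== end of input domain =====

-- B replaces A's single filter-into-accumulator pass by five sequential str.replace passes,
-- one forbidden character per pass (idiomatic; same return value).

-- ===== PORT A =====
-- for i in phone: if i in ' -()+': continue; base.append(i);  return ''.join(base)
def sanitize_phone_number (phone : String) : String :=
  let base : List Char :=
    phone.toList.foldl
      (fun base i => if PySem.Chars.isIn [i] " -()+".toList then base else base ++ [i]) []
  let real_string := String.ofList (PySem.Chars.join [] (base.map (fun c => [c])))
  real_string

-- ===== PORT B =====
-- return phone.replace(' ','').replace('-','').replace('(','').replace(')','').replace('+','')
def sanitize_phone_number_alt (phone : String) : String :=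
  PySem.Str.replace (PySem.Str.replace (PySem.Str.replace (PySem.Str.replace
    (PySem.Str.replace phone " " "") "-" "") "(" "") ")" "") "+" ""

-- ===== PRECONDITION & SPEC =====
def Spec_sanitize_phone_number (phone : String) (out : String) : Prop := out = sanitize_phone_number_alt phone
instance (phone : String) (out : String) : Decidable (Spec_sanitize_phone_number phone out) := by unfold Spec_sanitize_phone_number; infer_instance

-- ===== CLAIM (what is proved, stated in full; the proofs are below) =====
def Claim_equal_sanitize_phone_number : Prop := ∀ (phone : String), Dom_sanitize_phone_number phone → Spec_sanitize_phone_number phone (sanitize_phone_number phone)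

-- ===== LEMMAS AND PROOFS =====

-- replace with a singleton pattern and empty replacement is a filter
theorem replace_go_singleton (c : Char) (fuel : Nat) :
    ∀ (l acc : List Char), l.length ≤ fuel →
      PySem.Chars.replace.go [c] [] fuel l acc = acc.reverse ++ l.filter (fun x => x != c) := by
  induction fuel with
  | zero =>
      intro l acc h
      have : l = [] := List.eq_nil_of_length_eq_zero (Nat.le_zero.mp h)
      subst this
      simp [PySem.Chars.replace.go]
  | succ n ih =>
      intro l acc h
      cases l with
      | nil => simp [PySem.Chars.replace.go]
      | cons a t =>
          by_cases hac : a = c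
          · subst hac
            have : List.isPrefixOf [a] (a :: t) = true := by simp [List.isPrefixOf]
            simp only [PySem.Chars.replace.go, this, if_pos]
            have e1 : List.drop [a].length (a :: t) = t := rfl
            have e2 : ([] : List Char).reverse ++ acc = acc := rfl
            rw [e1, e2, ih t acc (by simpa using Nat.le_of_succ_le_succ h)]
            simp
          · have : List.isPrefixOf [c] (a :: t) = false := by
              simp [List.isPrefixOf]
              intro hh; exact hac hh.symm
            simp only [PySem.Chars.replace.go, this]
            rw [if_neg (by simp)]
            rw [ih t (a :: acc) (by simpa using Nat.le_of_succ_le_succ h)]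
            simp [hac]

theorem replace_singleton (c : Char) (l : List Char) :
    PySem.Chars.replace l [c] [] = l.filter (fun x => x != c) := by
  have h := replace_go_singleton c l.length l [] (Nat.le_refl _)
  simpa [PySem.Chars.replace] using h

-- [i] is a substring of s iff i is an element of s
theorem isIn_singleton (i : Char) (s : List Char) :
    PySem.Chars.isIn [i] s = decide (i ∈ s) := by
  by_cases h : i ∈ s
  · obtain ⟨u, v, rfl⟩ := List.append_of_mem h
    simp [PySem.Chars.isIn_iff_infix, h]
    exact ⟨u, v, by simp⟩
  · simp only [h, decide_false]
    rw [PySem.Chars.isIn_eq_false_iff]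
    rintro ⟨u, v, rfl⟩
    exact h (by simp)

-- A's loop is a filter
theorem foldl_filter (P : Char → Bool) :
    ∀ (l acc : List Char),
      l.foldl (fun b i => if P i then b else b ++ [i]) acc = acc ++ l.filter (fun i => !P i) := by
  intro l
  induction l with
  | nil => intro acc; simp
  | cons a t ih =>
      intro acc
      by_cases h : P a = true
      · simp [List.foldl_cons, h, ih]
      · simp only [Bool.not_eq_true] at h
        simp [List.foldl_cons, h, ih]

theorem alt_toList (phone : String) :
    (sanitize_phone_number_alt phone).toList =
      phone.toList.filter
        (fun x => !(x == ' ' || x == '-' || x == '(' || x == ')' || x == '+')) := by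
  unfold sanitize_phone_number_alt
  simp only [PySem.Str.toList_replace]
  have h1 : (" " : String).toList = [' '] := rfl
  have h2 : ("-" : String).toList = ['-'] := rfl
  have h3 : ("(" : String).toList = ['('] := rfl
  have h4 : (")" : String).toList = [')'] := rfl
  have h5 : ("+" : String).toList = ['+'] := rfl
  have h0 : ("" : String).toList = [] := rfl
  rw [h1, h2, h3, h4, h5, h0]
  simp only [replace_singleton, List.filter_filter]
  apply List.filter_congr
  intro x _
  cases hb1 : x == ' ' <;> cases hb2 : x == '-' <;> cases hb3 : x == '(' <;>
    cases hb4 : x == ')' <;> cases hb5 : x == '+' <;> simp [hb1, hb2, hb3, hb4, hb5, bne]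

-- ===== VERDICT (by name: the statement is the Claim_ definition above) =====
theorem sanitize_phone_number_spec : Claim_equal_sanitize_phone_number := by
  intro phone _
  unfold Spec_sanitize_phone_number
  apply String.ext
  rw [alt_toList]
  show (String.ofList (PySem.Chars.join []
      ((phone.toList.foldl
        (fun base i => if PySem.Chars.isIn [i] " -()+".toList then base else base ++ [i]) []).map
        (fun c => [c])))).toList = _
  rw [foldl_filter, List.nil_append, PySem.Chars.join_nil_singletons, String.toList_ofList]
  apply List.filter_congr
  intro x _
  rw [isIn_singleton]
  have : (" -()+".toList : List Char) = [' ', '-', '(', ')', '+'] := by decide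
  rw [this]
  by_cases h1 : x = ' ' <;> by_cases h2 : x = '-' <;> by_cases h3 : x = '(' <;>
    by_cases h4 : x = ')' <;> by_cases h5 : x = '+' <;> simp [h1, h2, h3, h4, h5]
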